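-- pv_equiv track=rewrite | github.com/manwar/perlweeklychallenge-club | challenge-340/lubos-kolouch/python/ch-2.py | ascending_numbers
-- ===== SOURCE A (Python) =====
-- def ascending_numbers(text: str) -> bool:
--     """Return ``True`` if the numbers inside *text* increase strictly."""
--
--     last_value: int | None = None
--     for token in text.split(" "):
--         if not token.isdigit():
--             continue
--
--         value = int(token)
--         if last_value is not None and value <= last_value:
--             return False
--         last_value = value
--
--     return True
-- ===== SOURCE B (Python) =====
-- def ascending_numbers(text: str) -> bool:
--     """Return ``True`` if the numbers inside *text* increase strictly."""
--     nums = [int(t) for t in text.split(" ") if t.isdigit()]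
--     return nums == sorted(nums) and len(nums) == len(set(nums))
-- ===== Notes on version B (the rewrite author's own statement) =====
-- stated objective: alternative
-- what changed: Replaces A's stateful early-exit scan comparing each number with the previous one by an order-theoretic characterisation with no adjacent comparison at all: extract the numbers, then strict increase holds iff the list equals its sorted version and has no duplicates (len(nums) == len(set(nums))).
import Mathlib
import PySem

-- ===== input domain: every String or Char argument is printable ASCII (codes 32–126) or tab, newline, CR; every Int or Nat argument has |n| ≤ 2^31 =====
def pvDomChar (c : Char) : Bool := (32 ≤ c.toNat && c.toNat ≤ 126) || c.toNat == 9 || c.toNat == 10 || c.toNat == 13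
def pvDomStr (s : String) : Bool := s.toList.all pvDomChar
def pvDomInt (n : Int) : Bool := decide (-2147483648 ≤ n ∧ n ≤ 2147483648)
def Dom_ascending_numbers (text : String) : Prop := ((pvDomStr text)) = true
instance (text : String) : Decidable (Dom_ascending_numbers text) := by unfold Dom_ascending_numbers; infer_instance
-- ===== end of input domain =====

-- B replaces A's stateful early-exit scan (previous-value comparison) by an order-theoretic
-- characterisation: the extracted numbers strictly increase iff the list equals its sorted
-- version and has no duplicates; objective: alternative (same task, different algorithm).


-- ===== PORT A =====
-- the for-loop with early return, carrying last_value : Option Int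
def ascLoopA : Option Int → List (List Char) → Bool
  | _, [] => true
  | last, t :: rest =>
    if PySem.Chars.strIsdigit t = false then ascLoopA last rest   -- continue
    else
      -- value = int(token); on a token whose chars are ASCII digits int() never raises,
      -- so the .getD 0 default is unreachable on Dom (exact there)
      let value := (PySem.Int.ofChars? t).getD 0
      match last with
      | some lv => if value ≤ lv then false else ascLoopA (some value) rest
      | none => ascLoopA (some value) rest

def ascending_numbers (text : String) : Bool :=
  ascLoopA none (PySem.Chars.splitOn text.toList [' '])

-- ===== PORT B =====
-- nums = [int(t) for t in text.split(" ") if t.isdigit()]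
def pvNumsB (text : String) : List Int :=
  ((PySem.Chars.splitOn text.toList [' ']).filter
      (fun t => PySem.Chars.strIsdigit t)).map (fun t => (PySem.Int.ofChars? t).getD 0)

-- return nums == sorted(nums) and len(nums) == len(set(nums))
def ascending_numbers_alt (text : String) : Bool :=
  decide (pvNumsB text = PySem.List.sorted (pvNumsB text) (fun x => x)) &&
    decide ((pvNumsB text).length = (PySem.Set.ofList (pvNumsB text)).length)

-- ===== PRECONDITION & SPEC =====
def Spec_ascending_numbers (text : String) (out : Bool) : Prop := out = ascending_numbers_alt text
instance (text : String) (out : Bool) : Decidable (Spec_ascending_numbers text out) := by unfold Spec_ascending_numbers; infer_instance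

-- ===== CLAIM (what is proved, stated in full; the proofs are below) =====
def Claim_equal_ascending_numbers : Prop := ∀ (text : String), Dom_ascending_numbers text → Spec_ascending_numbers text (ascending_numbers text)

-- ===== LEMMAS AND PROOFS =====
def numsGo (ts : List (List Char)) : List Int :=
  (ts.filter (fun t => PySem.Chars.strIsdigit t)).map (fun t => (PySem.Int.ofChars? t).getD 0)

-- A's loop decides that the extracted numbers form a <-chain ('last.toList' prefixes the carried value)
theorem ascLoopA_true_iff (ts : List (List Char)) :
    ∀ last : Option Int,
      (ascLoopA last ts = true ↔ List.IsChain (· < ·) (last.toList ++ numsGo ts)) := by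
  induction ts with
  | nil => intro last; cases last <;> simp [ascLoopA, numsGo]
  | cons t rest ih =>
    intro last
    by_cases hd : PySem.Chars.strIsdigit t = false
    · simpa [ascLoopA, numsGo, hd] using ih last
    · have hd' : PySem.Chars.strIsdigit t = true := eq_true_of_ne_false hd
      have hnums : numsGo (t :: rest) = (PySem.Int.ofChars? t).getD 0 :: numsGo rest := by
        simp [numsGo, hd']
      cases last with
      | none =>
        simp only [ascLoopA, hd', Bool.true_eq_false, if_false, hnums, Option.toList,
          List.nil_append]
        simpa using ih (some ((PySem.Int.ofChars? t).getD 0))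
      | some lv =>
        simp only [ascLoopA, hd', Bool.true_eq_false, if_false, hnums, Option.toList,
          List.cons_append, List.nil_append, List.isChain_cons_cons]
        by_cases h : (PySem.Int.ofChars? t).getD 0 ≤ lv
        · simp [h, not_lt.mpr h]
        · simpa [h, not_le.mp h] using ih (some ((PySem.Int.ofChars? t).getD 0))

-- set(xs) built by folding add over acc is acc ++ (a sublist of xs)
theorem foldl_add_sublist {α : Type} [BEq α] (xs : List α) :
    ∀ acc : List α, ∃ ys, xs.foldl PySem.Set.add acc = acc ++ ys ∧ ys.Sublist xs := by
  induction xs with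
  | nil => intro acc; exact ⟨[], by simp⟩
  | cons x xs ih =>
    intro acc
    by_cases hc : PySem.Set.contains acc x = true
    · obtain ⟨ys, h1, h2⟩ := ih acc
      refine ⟨ys, ?_, h2.cons x⟩
      simp only [List.foldl_cons, PySem.Set.add]
      rw [if_pos hc]
      exact h1
    · obtain ⟨ys, h1, h2⟩ := ih (acc ++ [x])
      refine ⟨x :: ys, ?_, h2.cons₂ x⟩
      simp only [List.foldl_cons, PySem.Set.add]
      rw [if_neg hc]
      simpa using h1

theorem foldl_add_of_nodup {α : Type} [BEq α] [LawfulBEq α] (xs : List α) :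
    ∀ acc : List α, (∀ x ∈ xs, x ∉ acc) → xs.Nodup → xs.foldl PySem.Set.add acc = acc ++ xs := by
  induction xs with
  | nil => intro acc _ _; simp
  | cons x xs ih =>
    intro acc hnm hnd
    have hx : x ∉ acc := hnm x (by simp)
    have hc : ¬ PySem.Set.contains acc x = true := by
      simp [PySem.Set.contains, hx]
    simp only [List.foldl_cons, PySem.Set.add]
    rw [if_neg hc, ih (acc ++ [x])]
    · simp
    · intro y hy
      simp only [List.mem_append, List.mem_singleton]
      rintro (h | rfl)
      · exact hnm y (by simp [hy]) h
      · exact (List.nodup_cons.mp hnd).1 hy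
    · exact (List.nodup_cons.mp hnd).2

-- len(xs) == len(set(xs)) iff xs has no duplicates
theorem ofList_length_eq_iff_nodup (xs : List Int) :
    (PySem.Set.ofList xs).length = xs.length ↔ xs.Nodup := by
  rw [PySem.Set.ofList_eq_foldl]
  constructor
  · intro h
    obtain ⟨ys, h1, h2⟩ := foldl_add_sublist xs []
    simp only [List.nil_append] at h1
    have hys : ys = xs := h2.eq_of_length (by rw [← h1]; exact h)
    have hfix : PySem.Set.ofList xs = xs := by
      rw [PySem.Set.ofList_eq_foldl, h1, hys]
    exact hfix ▸ PySem.Set.nodup_ofList xs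
  · intro h
    rw [foldl_add_of_nodup xs [] (by simp) h]
    simp

-- xs == sorted(xs) iff xs is (weakly) sorted
theorem eq_sorted_iff_pairwise_le (xs : List Int) :
    xs = PySem.List.sorted xs (fun x => x) ↔ xs.Pairwise (· ≤ ·) := by
  constructor
  · intro h
    rw [h]
    simpa using PySem.List.sorted_pairwise xs (fun x => x)
  · intro h
    exact (PySem.List.sorted_eq_self_of_pairwise xs (fun x => x) (by simpa using h)).symm

-- strict increase = weak increase + no duplicates
theorem pairwise_lt_iff (xs : List Int) :
    xs.Pairwise (· < ·) ↔ xs.Pairwise (· ≤ ·) ∧ xs.Nodup := by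
  constructor
  · intro h
    exact ⟨h.imp le_of_lt, h.imp ne_of_lt⟩
  · rintro ⟨h1, h2⟩
    exact (h1.and h2).imp (fun ⟨a, b⟩ => lt_of_le_of_ne a b)

-- ===== VERDICT (by name: the statement is the Claim_ definition above) =====
theorem ascending_numbers_spec : Claim_equal_ascending_numbers := by
  intro text _
  unfold Spec_ascending_numbers ascending_numbers ascending_numbers_alt
  rw [Bool.eq_iff_iff]
  have h1 := ascLoopA_true_iff (PySem.Chars.splitOn text.toList [' ']) none
  simp only [Option.toList, List.nil_append] at h1
  have hg : numsGo (PySem.Chars.splitOn text.toList [' ']) = pvNumsB text := rfl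
  rw [hg] at h1
  rw [h1, List.isChain_iff_pairwise, pairwise_lt_iff]
  simp only [Bool.and_eq_true, decide_eq_true_eq]
  rw [eq_sorted_iff_pairwise_le]
  constructor
  · rintro ⟨ha, hb⟩
    exact ⟨ha, ((ofList_length_eq_iff_nodup _).mpr hb).symm⟩
  · rintro ⟨ha, hb⟩
    exact ⟨ha, (ofList_length_eq_iff_nodup _).mp hb.symm⟩
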